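/- GENERATED by tools/from_farm_form.py from prooffarm-gif/accepted/DGifGetLine.E/Proof.lean (a worked proof of the farm's unit `DGifGetLine.E`,
   accepted by the verdict) — do not edit. -/
import Gif.Spec.Units.DGifGetLine_E
import Gif.Spec.AllSegs

open X86 X86.User Asan ProgX.Base ProgX.Base.Spec Gif.Spec

/-!
  `DGifGetLine.E` (0x10a28e … the `ret` at 0x10a2aa, 10 instructions; dgif_lib.c:522): the epilogue of the protected function
  `DGifGetLine`, after the worked example farm.gif/worked/DGifGetWord.E (lemmas: Gif/Spec/FrameCarry.lean §1, §2, §4):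
    1. the prelude: the entry assertion `Done` as walker facts; the shadow index register `r12` as a word VARIABLE `b` with bounds;
    2. the walk to the `ret` (the six pops and the return address are read through the shadow store by the walker itself);
    3. `stores1_index`: `hmem : s.mem = storesMem v.mem (base / 8) F.epilogue`;
    4. `after_epilogue` (`HeapInv` for the callers' frames, `GifOK`, `rem`), `epilogue_same` (`Returned.same`), `LZOK.sameExcept`;
    5. `Returned`, field by field.
-/

/-- The epilogue of `DGifGetLine` takes `Done` at 0x10a28e to `Returned`. -/
theorem Gif.Spec.Proved.DGifGetLine_E_ok : Gif.Spec.DGifGetLine_E.Statement := by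
  intro Lay hLay μ hμ u₀ hcode H rest frames F R n e ret v hat
  -- 1. THE PRELUDE: the entry assertion `Done` = `Body` + the result in `ebx`
  obtain ⟨hbody, hres⟩ := hat
  have he := hbody.entry
  v_entry he
  obtain ⟨henv, hlz0, hrdi, hrdx, hn1, hn2, hbuf, hfar⟩ := hbody.pre
  have w_rip := hbody.rip
  have c_rsp : v.reg .rsp = e.reg .rsp - 120 := hbody.rsp
  have w_kept : RegsKept [.rsp] v v := RegsKept.refl _ _
  have w_eq : Mem.EqOn ProgX.Base.L.textLo ProgX.Base.L.textHi u₀.mem v.mem := ProgX.Base.conv_code_eqOn hbody.code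
  have hdf := (show abiInv _ from hbody.abi).1
  have hmx := (show abiInv _ from hbody.abi).2
  have hsse := ProgX.Base.sseOK_of_abiInv hbody.abi
  -- the slots the pops and the `ret` read
  have k_r15 : v.mem.readLE (e.reg .rsp - 8) 8 = (e.reg .r15).toNat := hbody.slot_r15
  have k_r14 : v.mem.readLE (e.reg .rsp - 16) 8 = (e.reg .r14).toNat := hbody.slot_r14
  have k_r13 : v.mem.readLE (e.reg .rsp - 24) 8 = (e.reg .r13).toNat := hbody.slot_r13
  have k_r12 : v.mem.readLE (e.reg .rsp - 32) 8 = (e.reg .r12).toNat := hbody.slot_r12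
  have k_rbp : v.mem.readLE (e.reg .rsp - 40) 8 = (e.reg .rbp).toNat := hbody.slot_rbp
  have k_rbx : v.mem.readLE (e.reg .rsp - 48) 8 = (e.reg .rbx).toNat := hbody.slot_rbx
  have k_ra : UInt64.ofNat (v.mem.readLE (e.reg .rsp) 8) = ret := hbody.slot_ra
  -- the result register as a variable
  obtain ⟨z, c_rbx⟩ : ∃ z, v.reg .rbx = z := ⟨_, rfl⟩
  rw [c_rbx] at hres
  -- THE SHADOW INDEX REGISTER AS A VARIABLE `b` WITH BOUNDS
  have e120 : (e.reg .rsp - 120).toNat = (e.reg .rsp).toNat - 120 := by u_omega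
  obtain ⟨b, hb⟩ : ∃ b : Word, b = (e.reg .rsp - 120) >>> 3 := ⟨_, rfl⟩
  have hbn : b.toNat = ((e.reg .rsp).toNat - 120) / 8 := by
    rw [hb, Asan.toNat_shr3, e120]
  have hb1 : 0xE0000 ≤ b.toNat := by omega
  have hb2 : b.toNat + 8 ≤ 0x100000 := by omega
  have c_r12 : v.reg .r12 = b := by
    rw [hb]
    exact hbody.r12
  clear hb
  -- 2. THE WALK, to the `ret`
  u_walk hcode [hμ.vendor] span [ProgX.Base.L.textLo, ProgX.Base.L.textHi] side (v_side)
  -- 3. THE EPILOGUE'S STORE AS THE LAYOUT'S `storesMem`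
  have hepi : Gif.Frames.DGifGetLine.epilogue = [⟨0, 8, 0⟩] := rfl
  have hmem : s_10a2aa.mem = storesMem v.mem (((e.reg .rsp).toNat - 120) / 8) Gif.Frames.DGifGetLine.epilogue := by
    rw [hepi, w_mem, ← hbn]
    exact stores1_index v.mem b 12582912 0 8 0 (by omega) (by decide) (by decide)
  have hin : ∀ s, s ∈ Gif.Frames.DGifGetLine.epilogue → s.idx + s.width ≤ 8 := by decide
  clear w_mem
  -- 4. THE ENVIRONMENT behind the epilogue: the callers' frames, the clean stack ends above the return address
  obtain ⟨hinv2, hok2, hrem2⟩ := after_epilogue (top := (e.reg .rsp).toNat) (ro := 120) (Fl := Gif.Frames.DGifGetLine) rfl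
    hbody.inv henv.ctx hbody.ok he_align he_top henv.heap.inv.frames_above
  -- the frame's shadow span leaves the footprint
  have hsame2 := epilogue_same (top := (e.reg .rsp).toNat) (ro := 120) (ro' := 56) (Fl := Gif.Frames.DGifGetLine) rfl rfl
    henv.heap.inv hbody.inv he_align hbody.same
  -- `LZOK` reads `[pv + 8, pv + 48)`, far below the shadow
  have hpin := henv.ok.owns.inside henv.heap.inv.heap (o := (F.pv, 24936)) (List.mem_cons_of_mem _ List.mem_cons_self)
  have hbase := henv.heap.base
  simp only at hpin
  rw [hbase] at hpin
  have hroom := henv.heap.inv.heap.room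
  have hlimit := henv.heap.limit
  rw [hbase, hlimit] at hroom
  have hpv2 : F.pv + 24936 ≤ 0xC00000 := by
    have h2 := hpin.2.1
    omega
  have hlz2 : LZOK (storesMem v.mem (((e.reg .rsp).toNat - 120) / 8) Gif.Frames.DGifGetLine.epilogue) F.pv := by
    refine hbody.lz.sameExcept (storesMem_sameExcept v.mem _ 8 _ hin (by omega)) (by omega) ?_
    intro w hw
    have ew := List.mem_singleton.mp hw
    rw [ew]
    simp only
    omega
  rw [← hmem] at hinv2 hok2 hrem2 hsame2 hlz2
  -- 5. `Returned`, field by field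
  refine ReachVia.done ?_
  refine X86.User.Returned.mk w_rip w_rsp ?saved ?same (ProgX.Base.conv_code_in w_eq) ?abi ?post
  case saved =>
    -- all six callee-saved registers were pushed: the pops restore them
    intro r hr
    cases r <;> first
      | exact absurd hr (by decide)
      | (with_reducible assumption)
  case same =>
    simp only [X86.User.Spec.footprint, vspec]
    exact hsame2
  case abi =>
    -- DF and MXCSR by hand (`v_inv` is slow behind a walk with shadow stores)
    refine ProgX.Base.abiInv_of ?_ ?_
    · rw [w_flags]
      simp only [X86.User.df_setStatus]
      exact hdf
    · rw [w_mxcsr]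
      exact hmx
  case post =>
    -- `Back` (the environment, the reader did not go back), `LZOK`, the result (`mov eax, ebx` zero-extends)
    refine ⟨⟨hinv2, hok2, ?_⟩, hlz2, ?_⟩
    · rw [hrem2]
      exact hbody.rem
    · unfold IsBool
      rw [w_rax, ProgX.toNat_ofBV32, ProgX.toNat_part32]
      exact hres
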